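-- pv_equiv track=rewrite | github.com/kevin-helliwell/python_examples | mix3.py | mix3
-- ===== SOURCE A (Python) =====
-- def mix3(a: str, b: str, c: str) -> str:
--     max_len = max(len(a), len(b), len(c))
--
--     i = 0
--     string = ""
--
--     while i < max_len:
--         if i < len(a):
--             string += a[i]
--
--         if i < len(b):
--             string += b[i]
--
--         if i < len(c):
--             string += c[i]
--
--         i += 1
--
--     return string
-- ===== SOURCE B (Python) =====
-- def mix3(a: str, b: str, c: str) -> str:
--     # Three-segment construction: while all three strings are alive every position
--     # contributes a full triple; between the shortest and the median length only the
--     # live strings contribute; past the median at most one string survives, so its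
--     # whole remainder is appended as a single slice.
--     la, lb, lc = len(a), len(b), len(c)
--     m1 = min(la, lb, lc)                       # shortest length
--     m2 = la + lb + lc - m1 - max(la, lb, lc)   # median length
--     parts = [a[i] + b[i] + c[i] for i in range(m1)]
--     for i in range(m1, m2):
--         parts.append((a[i] if i < la else '') + (b[i] if i < lb else '') + (c[i] if i < lc else ''))
--     return ''.join(parts) + a[m2:] + b[m2:] + c[m2:]
-- ===== Notes on version B (the rewrite author's own statement) =====
-- stated objective: faster
-- what changed: Replaces A's single index loop with three length guards and quadratic repeated string concatenation by a three-segment construction: full triples up to the min length, guarded contributions between min and median length, and the at-most-one surviving string appended as a single bulk slice, all joined once.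
import Mathlib
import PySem

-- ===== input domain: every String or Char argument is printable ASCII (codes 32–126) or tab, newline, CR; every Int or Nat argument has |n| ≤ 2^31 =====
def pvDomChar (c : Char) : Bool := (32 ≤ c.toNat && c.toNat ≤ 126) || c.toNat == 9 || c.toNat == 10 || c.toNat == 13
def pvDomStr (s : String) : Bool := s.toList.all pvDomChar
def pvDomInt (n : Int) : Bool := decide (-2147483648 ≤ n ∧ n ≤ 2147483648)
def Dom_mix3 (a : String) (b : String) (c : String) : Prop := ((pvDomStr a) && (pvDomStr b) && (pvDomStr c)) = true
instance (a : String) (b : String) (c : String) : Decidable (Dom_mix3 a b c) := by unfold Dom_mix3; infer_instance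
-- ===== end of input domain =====

-- B replaces A's single guarded index loop with repeated string concatenation by a
-- three-segment construction (full triples up to the min length, live pairs up to the
-- median, then the lone survivor appended as one slice), joined once (measured faster:
-- A repeatedly concatenates strings, B builds a list and joins).

-- ===== PORT A =====
-- A's while loop: counter i, accumulator string, guarded appends a[i], b[i], c[i].
def mix3Go (la lb lc : List Char) (maxLen i : Nat) (acc : List Char) : List Char :=
  if _h : i < maxLen then
    let acc1 := if i < la.length then acc ++ [la.getD i ' '] else acc
    let acc2 := if i < lb.length then acc1 ++ [lb.getD i ' '] else acc1
    let acc3 := if i < lc.length then acc2 ++ [lc.getD i ' '] else acc2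
    mix3Go la lb lc maxLen (i + 1) acc3
  else acc
termination_by maxLen - i

def mix3 (a : String) (b : String) (c : String) : String :=
  String.ofList (mix3Go a.toList b.toList c.toList
    (max (max a.toList.length b.toList.length) c.toList.length) 0 [])

-- ===== PORT B =====
-- Source B: m1 = min length, m2 = median length; full triples on range(m1), guarded
-- pairs on range(m1, m2), then the tail slices a[m2:], b[m2:], c[m2:] (at most one
-- is nonempty), all joined once.
def mix3_alt (a : String) (b : String) (c : String) : String :=
  let A := a.toList; let B := b.toList; let C := c.toList
  let la := A.length; let lb := B.length; let lc := C.length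
  let m1 := min la (min lb lc)
  let m2 := la + lb + lc - m1 - max la (max lb lc)
  let parts := (List.range m1).map (fun i => [A.getD i ' ', B.getD i ' ', C.getD i ' '])
  let parts2 := (List.range' m1 (m2 - m1)).foldl (fun acc i =>
      acc ++ [(if i < la then [A.getD i ' '] else []) ++
              (if i < lb then [B.getD i ' '] else []) ++
              (if i < lc then [C.getD i ' '] else [])]) parts
  String.ofList (parts2.flatten ++ A.drop m2 ++ B.drop m2 ++ C.drop m2)

-- ===== PRECONDITION & SPEC =====
def Spec_mix3 (a : String) (b : String) (c : String) (out : String) : Prop := out = mix3_alt a b c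
instance (a : String) (b : String) (c : String) (out : String) : Decidable (Spec_mix3 a b c out) := by unfold Spec_mix3; infer_instance

-- ===== CLAIM (what is proved, stated in full; the proofs are below) =====
def Claim_equal_mix3 : Prop := ∀ (a : String) (b : String) (c : String), Dom_mix3 a b c → Spec_mix3 a b c (mix3 a b c)

-- ===== LEMMAS AND PROOFS =====

-- The guarded contribution of position i (what A's loop body appends at i).
def posStep (A B C : List Char) : Nat → List Char := fun i =>
  (if i < A.length then [A.getD i ' '] else []) ++
  (if i < B.length then [B.getD i ' '] else []) ++
  (if i < C.length then [C.getD i ' '] else [])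

-- A's loop from i equals the flatMap of posStep over the remaining indices.
theorem mix3Go_eq_flatMap (A B C : List Char) :
    ∀ k M i acc, M - i ≤ k →
      mix3Go A B C M i acc = acc ++ (List.range' i (M - i)).flatMap (posStep A B C) := by
  intro k
  induction k with
  | zero =>
    intro M i acc h
    rw [mix3Go]
    simp [show ¬ i < M by omega, show M - i = 0 by omega]
  | succ k ih =>
    intro M i acc h
    rw [mix3Go]
    by_cases hi : i < M
    · simp only [dif_pos hi]
      have hstep : ∀ acc : List Char,
          (let acc1 := if i < A.length then acc ++ [A.getD i ' '] else acc
           let acc2 := if i < B.length then acc1 ++ [B.getD i ' '] else acc1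
           if i < C.length then acc2 ++ [C.getD i ' '] else acc2)
          = acc ++ posStep A B C i := by
        intro acc; unfold posStep; split_ifs <;> simp
      rw [hstep, ih M (i + 1) _ (by omega),
        show M - i = (M - (i + 1)) + 1 by omega, List.range'_succ]
      simp [List.append_assoc]
    · simp [dif_neg hi, show M - i = 0 by omega]

-- Past the median, only the surviving (longest) string contributes: the flatMap
-- collapses to its drop.  One lemma per position of the longest string.
theorem tailA : ∀ k (A B C : List Char) j, B.length ≤ j → C.length ≤ j → j + k = A.length →
    (List.range' j k).flatMap (posStep A B C) = A.drop j := by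
  intro k
  induction k with
  | zero =>
    intro A B C j _ _ hj
    simp [List.drop_of_length_le (by omega : A.length ≤ j)]
  | succ k ih =>
    intro A B C j hb hc hj
    have hjA : j < A.length := by omega
    rw [List.range'_succ, List.flatMap_cons, ih A B C (j + 1) (by omega) (by omega) (by omega)]
    unfold posStep
    rw [if_pos hjA, if_neg (by omega), if_neg (by omega),
      List.drop_eq_getElem_cons hjA, List.getD_eq_getElem A ' ' hjA]
    simp

theorem tailB : ∀ k (A B C : List Char) j, A.length ≤ j → C.length ≤ j → j + k = B.length →
    (List.range' j k).flatMap (posStep A B C) = B.drop j := by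
  intro k
  induction k with
  | zero =>
    intro A B C j _ _ hj
    simp [List.drop_of_length_le (by omega : B.length ≤ j)]
  | succ k ih =>
    intro A B C j ha hc hj
    have hjB : j < B.length := by omega
    rw [List.range'_succ, List.flatMap_cons, ih A B C (j + 1) (by omega) (by omega) (by omega)]
    unfold posStep
    rw [if_neg (by omega), if_pos hjB, if_neg (by omega),
      List.drop_eq_getElem_cons hjB, List.getD_eq_getElem B ' ' hjB]
    simp

theorem tailC : ∀ k (A B C : List Char) j, A.length ≤ j → B.length ≤ j → j + k = C.length →
    (List.range' j k).flatMap (posStep A B C) = C.drop j := by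
  intro k
  induction k with
  | zero =>
    intro A B C j _ _ hj
    simp [List.drop_of_length_le (by omega : C.length ≤ j)]
  | succ k ih =>
    intro A B C j ha hb hj
    have hjC : j < C.length := by omega
    rw [List.range'_succ, List.flatMap_cons, ih A B C (j + 1) (by omega) (by omega) (by omega)]
    unfold posStep
    rw [if_neg (by omega), if_neg (by omega), if_pos hjC,
      List.drop_eq_getElem_cons hjC, List.getD_eq_getElem C ' ' hjC]
    simp

-- B's segmented construction equals the flatMap of posStep over all positions.
theorem alt_list_eq (A B C : List Char) :
    (((List.range' (min A.length (min B.length C.length))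
        (A.length + B.length + C.length - min A.length (min B.length C.length)
          - max A.length (max B.length C.length) - min A.length (min B.length C.length))).foldl
        (fun acc i => acc ++ [(if i < A.length then [A.getD i ' '] else []) ++
                              (if i < B.length then [B.getD i ' '] else []) ++
                              (if i < C.length then [C.getD i ' '] else [])])
        ((List.range (min A.length (min B.length C.length))).map
          (fun i => [A.getD i ' ', B.getD i ' ', C.getD i ' ']))).flatten
      ++ A.drop (A.length + B.length + C.length - min A.length (min B.length C.length)
          - max A.length (max B.length C.length))
      ++ B.drop (A.length + B.length + C.length - min A.length (min B.length C.length)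
          - max A.length (max B.length C.length))
      ++ C.drop (A.length + B.length + C.length - min A.length (min B.length C.length)
          - max A.length (max B.length C.length)))
    = (List.range' 0 (max (max A.length B.length) C.length)).flatMap (posStep A B C) := by
  set la := A.length with hla
  set lb := B.length with hlb
  set lc := C.length with hlc
  set m1 := min la (min lb lc) with hm1
  set M := max la (max lb lc) with hM
  set m2 := la + lb + lc - m1 - M with hm2
  have hMM : max (max la lb) lc = M := by omega
  have h12 : m1 ≤ m2 := by omega
  have h2M : m2 ≤ M := by omega
  rw [hMM, PySem.List.foldl_append_singleton_eq_map, List.flatten_append,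
    ← List.flatMap_def, List.range_eq_range']
  have hstep : (fun i => (if i < la then [A.getD i ' '] else []) ++
      (if i < lb then [B.getD i ' '] else []) ++
      (if i < lc then [C.getD i ' '] else [])) = posStep A B C := rfl
  rw [hstep]
  have hseg1 : (List.range' 0 m1).flatMap
      (fun i => [A.getD i ' ', B.getD i ' ', C.getD i ' '])
      = (List.range' 0 m1).flatMap (posStep A B C) := by
    apply List.flatMap_congr
    intro i hi
    have hi' : i < m1 := by
      have := List.mem_range'_1.mp hi; omega
    unfold posStep
    rw [if_pos (by omega), if_pos (by omega), if_pos (by omega)]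
    rfl
  rw [← List.flatMap_def, hseg1]
  have htail : A.drop m2 ++ B.drop m2 ++ C.drop m2
      = (List.range' m2 (M - m2)).flatMap (posStep A B C) := by
    have hcases : M = m2 ∨ (la = M ∧ lb ≤ m2 ∧ lc ≤ m2) ∨ (lb = M ∧ la ≤ m2 ∧ lc ≤ m2)
        ∨ (lc = M ∧ la ≤ m2 ∧ lb ≤ m2) := by omega
    rcases hcases with h | ⟨h, h1, h2⟩ | ⟨h, h1, h2⟩ | ⟨h, h1, h2⟩
    · rw [show M - m2 = 0 by omega]
      simp [List.drop_of_length_le (show la ≤ m2 by omega),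
        List.drop_of_length_le (show lb ≤ m2 by omega),
        List.drop_of_length_le (show lc ≤ m2 by omega)]
    · rw [tailA (M - m2) A B C m2 h1 h2 (by omega)]
      simp [List.drop_of_length_le h1, List.drop_of_length_le h2]
    · rw [tailB (M - m2) A B C m2 h1 h2 (by omega)]
      simp [List.drop_of_length_le h1, List.drop_of_length_le h2]
    · rw [tailC (M - m2) A B C m2 h1 h2 (by omega)]
      simp [List.drop_of_length_le h1, List.drop_of_length_le h2]
  rw [List.append_assoc, List.append_assoc, ← List.append_assoc (A.drop m2), htail,
    ← List.flatMap_append, ← List.flatMap_append]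
  congr 1
  have e1 : List.range' 0 m1 ++ List.range' m1 (m2 - m1) = List.range' 0 m2 := by
    have h := List.range'_append_1 (s := 0) (m := m1) (n := m2 - m1)
    simpa [show m1 + (m2 - m1) = m2 by omega] using h
  have e2 : List.range' 0 m2 ++ List.range' m2 (M - m2) = List.range' 0 M := by
    have h := List.range'_append_1 (s := 0) (m := m2) (n := M - m2)
    simpa [show m2 + (M - m2) = M by omega] using h
  rw [e1, e2]

-- ===== VERDICT (by name: the statement is the Claim_ definition above) =====
theorem mix3_spec : Claim_equal_mix3 := by
  intro a b c _
  unfold Spec_mix3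
  have h2 : mix3_alt a b c
      = String.ofList ((List.range' 0
          (max (max a.toList.length b.toList.length) c.toList.length)).flatMap
          (posStep a.toList b.toList c.toList)) :=
    congrArg String.ofList (alt_list_eq a.toList b.toList c.toList)
  rw [h2]
  unfold mix3
  rw [mix3Go_eq_flatMap a.toList b.toList c.toList
    (max (max a.toList.length b.toList.length) c.toList.length)
    (max (max a.toList.length b.toList.length) c.toList.length) 0 [] (le_refl _)]
  simp
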